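-- pv_equiv track=rewrite | github.com/wellbar2/CesarAlex | app.py | compute_venn_counts_from_observations
-- ===== SOURCE A (Python) =====
-- def venn_category_for_row(presente_lattes, presente_orcid, presente_openalex):
--     l = bool(presente_lattes)
--     o = bool(presente_orcid)
--     a = bool(presente_openalex)
--
--     if l and o and a:
--         return "Lattes_ORCID_OpenAlex"
--     if l and o and not a:
--         return "Lattes_ORCID_Apenas"
--     if l and not o and a:
--         return "Lattes_OpenAlex_Apenas"
--     if not l and o and a:
--         return "ORCID_OpenAlex_Apenas"
--     if l and not o and not a:
--         return "Lattes_Apenas"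
--     if not l and o and not a:
--         return "ORCID_Apenas"
--     if not l and not o and a:
--         return "OpenAlex_Apenas"
--     return None
--
-- def compute_venn_counts_from_observations(all_report_rows):
--     counts = {
--         "Lattes_Apenas": 0,
--         "ORCID_Apenas": 0,
--         "OpenAlex_Apenas": 0,
--         "Lattes_ORCID_Apenas": 0,
--         "Lattes_OpenAlex_Apenas": 0,
--         "ORCID_OpenAlex_Apenas": 0,
--         "Lattes_ORCID_OpenAlex": 0,
--     }
--     for r in all_report_rows:
--         cat = venn_category_for_row(
--             r.get("Presente no Lattes", False),
--             r.get("Presente no ORCID", False),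
--             r.get("Presente na OpenAlex", False),
--         )
--         if cat:
--             counts[cat] += 1
--     total = sum(counts.values())
--     return counts, total
-- ===== SOURCE B (Python) =====
-- def compute_venn_counts_from_observations(all_report_rows):
--     # Inclusion-exclusion: count marginals and intersections, then Mobius-invert
--     # into the seven exclusive Venn regions; no row is ever classified.
--     flags = [
--         (bool(r.get("Presente no Lattes", False)),
--          bool(r.get("Presente no ORCID", False)),
--          bool(r.get("Presente na OpenAlex", False)))
--         for r in all_report_rows
--     ]
--     nL = sum(l for l, o, a in flags)
--     nO = sum(o for l, o, a in flags)
--     nA = sum(a for l, o, a in flags)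
--     nLO = sum(l and o for l, o, a in flags)
--     nLA = sum(l and a for l, o, a in flags)
--     nOA = sum(o and a for l, o, a in flags)
--     nLOA = sum(l and o and a for l, o, a in flags)
--     counts = {
--         "Lattes_Apenas": nL - nLO - nLA + nLOA,
--         "ORCID_Apenas": nO - nLO - nOA + nLOA,
--         "OpenAlex_Apenas": nA - nLA - nOA + nLOA,
--         "Lattes_ORCID_Apenas": nLO - nLOA,
--         "Lattes_OpenAlex_Apenas": nLA - nLOA,
--         "ORCID_OpenAlex_Apenas": nOA - nLOA,
--         "Lattes_ORCID_OpenAlex": nLOA,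
--     }
--     total = nL + nO + nA - nLO - nLA - nOA + nLOA
--     return counts, total
-- ===== Notes on version B (the rewrite author's own statement) =====
-- stated objective: alternative
-- what changed: A classifies each row into one of seven Venn regions with an if-cascade and increments a running dict; B never classifies a row: it counts the marginals and intersections (|L|,|O|,|A|,|LO|,|LA|,|OA|,|LOA|) and derives every exclusive region and the union total arithmetically by inclusion-exclusion (Mobius inversion).
import Mathlib
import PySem

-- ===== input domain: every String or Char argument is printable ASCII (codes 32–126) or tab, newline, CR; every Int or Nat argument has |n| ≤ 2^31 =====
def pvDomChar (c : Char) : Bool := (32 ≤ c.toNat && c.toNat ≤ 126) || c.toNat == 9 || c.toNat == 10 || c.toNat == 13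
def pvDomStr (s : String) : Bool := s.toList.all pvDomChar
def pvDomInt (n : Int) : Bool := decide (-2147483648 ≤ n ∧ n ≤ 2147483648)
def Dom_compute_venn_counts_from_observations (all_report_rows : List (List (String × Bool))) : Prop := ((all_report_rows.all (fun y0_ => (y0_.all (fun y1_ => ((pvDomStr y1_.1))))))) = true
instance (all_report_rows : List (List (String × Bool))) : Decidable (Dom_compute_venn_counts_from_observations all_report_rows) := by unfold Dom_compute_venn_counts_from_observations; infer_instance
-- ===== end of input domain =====

-- B replaces A's per-row seven-way classification by inclusion-exclusion: it counts
-- marginals/intersections and Mobius-inverts them into the regions (objective: alternative).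

-- ===== PORT A =====
-- Python `r.get(key, False)` on a row dict (rows arrive as association lists)
def pvRowGet (r : List (String × Bool)) (key : String) : Bool :=
  PySem.Dict.getD (PySem.Dict.mk r) key false

def venn_category_for_row (presente_lattes presente_orcid presente_openalex : Bool) : Option String :=
  let l := presente_lattes
  let o := presente_orcid
  let a := presente_openalex
  if l && o && a then some "Lattes_ORCID_OpenAlex"
  else if l && o && !a then some "Lattes_ORCID_Apenas"
  else if l && !o && a then some "Lattes_OpenAlex_Apenas"
  else if !l && o && a then some "ORCID_OpenAlex_Apenas"
  else if l && !o && !a then some "Lattes_Apenas"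
  else if !l && o && !a then some "ORCID_Apenas"
  else if !l && !o && a then some "OpenAlex_Apenas"
  else none

def compute_venn_counts_from_observations (all_report_rows : List (List (String × Bool))) : (List (String × Int)) × Int :=
  let counts0 : PySem.Dict String Int := PySem.Dict.mk
    [("Lattes_Apenas", 0), ("ORCID_Apenas", 0), ("OpenAlex_Apenas", 0),
     ("Lattes_ORCID_Apenas", 0), ("Lattes_OpenAlex_Apenas", 0),
     ("ORCID_OpenAlex_Apenas", 0), ("Lattes_ORCID_OpenAlex", 0)]
  let counts := all_report_rows.foldl (fun d r =>
    match venn_category_for_row (pvRowGet r "Presente no Lattes")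
        (pvRowGet r "Presente no ORCID") (pvRowGet r "Presente na OpenAlex") with
    -- `if cat: counts[cat] += 1`: every returned category is a nonempty string and a key of
    -- counts, so the truthiness test is `is not None` and `+= 1` is `modify c 0 (· + 1)`
    | some c => d.modify c 0 (· + 1)
    | none => d) counts0
  let total := counts.values.foldl (· + ·) 0
  (counts.items, total)

-- ===== PORT B =====
def compute_venn_counts_from_observations_alt (all_report_rows : List (List (String × Bool))) : (List (String × Int)) × Int :=
  let flags := all_report_rows.map (fun r =>
    (pvRowGet r "Presente no Lattes", pvRowGet r "Presente no ORCID", pvRowGet r "Presente na OpenAlex"))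
  -- each Python `sum(... for l, o, a in flags)` of booleans is a counting pass
  let nL : Int := flags.countP (fun x => x.1)
  let nO : Int := flags.countP (fun x => x.2.1)
  let nA : Int := flags.countP (fun x => x.2.2)
  let nLO : Int := flags.countP (fun x => x.1 && x.2.1)
  let nLA : Int := flags.countP (fun x => x.1 && x.2.2)
  let nOA : Int := flags.countP (fun x => x.2.1 && x.2.2)
  let nLOA : Int := flags.countP (fun x => x.1 && x.2.1 && x.2.2)
  let counts : List (String × Int) :=
    [("Lattes_Apenas", nL - nLO - nLA + nLOA),
     ("ORCID_Apenas", nO - nLO - nOA + nLOA),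
     ("OpenAlex_Apenas", nA - nLA - nOA + nLOA),
     ("Lattes_ORCID_Apenas", nLO - nLOA),
     ("Lattes_OpenAlex_Apenas", nLA - nLOA),
     ("ORCID_OpenAlex_Apenas", nOA - nLOA),
     ("Lattes_ORCID_OpenAlex", nLOA)]
  let total := nL + nO + nA - nLO - nLA - nOA + nLOA
  (counts, total)

-- ===== PRECONDITION & SPEC =====
def Spec_compute_venn_counts_from_observations (all_report_rows : List (List (String × Bool))) (out : (List (String × Int)) × Int) : Prop := out = compute_venn_counts_from_observations_alt all_report_rows
instance (all_report_rows : List (List (String × Bool))) (out : (List (String × Int)) × Int) : Decidable (Spec_compute_venn_counts_from_observations all_report_rows out) := by unfold Spec_compute_venn_counts_from_observations; infer_instance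

-- ===== CLAIM (what is proved, stated in full; the proofs are below) =====
def Claim_equal_compute_venn_counts_from_observations : Prop := ∀ (all_report_rows : List (List (String × Bool))), Dom_compute_venn_counts_from_observations all_report_rows → Spec_compute_venn_counts_from_observations all_report_rows (compute_venn_counts_from_observations all_report_rows)

-- ===== LEMMAS AND PROOFS =====
-- total category name of a triple ("" for the all-false triple, which A skips)
def pvCatStr (x : Bool × Bool × Bool) : String :=
  match x with
  | (true, false, false) => "Lattes_Apenas"
  | (false, true, false) => "ORCID_Apenas"
  | (false, false, true) => "OpenAlex_Apenas"
  | (true, true, false) => "Lattes_ORCID_Apenas"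
  | (true, false, true) => "Lattes_OpenAlex_Apenas"
  | (false, true, true) => "ORCID_OpenAlex_Apenas"
  | (true, true, true) => "Lattes_ORCID_OpenAlex"
  | (false, false, false) => ""

theorem pv_body_eq (d : PySem.Dict String Int) (l o a : Bool) :
    (match venn_category_for_row l o a with
     | some c => d.modify c 0 (· + 1)
     | none => d)
    = (if !((l, o, a) == (false, false, false)) then d.modify (pvCatStr (l, o, a)) 0 (· + 1) else d) := by
  cases l <;> cases o <;> cases a <;> rfl

theorem pv_count_key (n : String) (k : Bool × Bool × Bool)
    (h : ∀ x : Bool × Bool × Bool, (pvCatStr x = n ∧ ¬ x = (false, false, false)) ↔ x = k)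
    (L : List (Bool × Bool × Bool)) :
    ((L.filter (fun x => !(x == (false, false, false)))).map pvCatStr).count n = L.count k := by
  simp only [List.count_eq_countP, List.countP_map, List.countP_filter]
  exact List.countP_congr (fun x _ => by simpa using h x)

-- the seven marginal/intersection counts decomposed into the eight exact-triple counts
theorem pv_decomp (L : List (Bool × Bool × Bool)) :
    L.countP (fun x => x.1)
      = L.count (true, false, false) + L.count (true, true, false)
        + L.count (true, false, true) + L.count (true, true, true)
    ∧ L.countP (fun x => x.2.1)
      = L.count (false, true, false) + L.count (true, true, false)
        + L.count (false, true, true) + L.count (true, true, true)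
    ∧ L.countP (fun x => x.2.2)
      = L.count (false, false, true) + L.count (true, false, true)
        + L.count (false, true, true) + L.count (true, true, true)
    ∧ L.countP (fun x => x.1 && x.2.1)
      = L.count (true, true, false) + L.count (true, true, true)
    ∧ L.countP (fun x => x.1 && x.2.2)
      = L.count (true, false, true) + L.count (true, true, true)
    ∧ L.countP (fun x => x.2.1 && x.2.2)
      = L.count (false, true, true) + L.count (true, true, true)
    ∧ L.countP (fun x => x.1 && x.2.1 && x.2.2) = L.count (true, true, true) := by
  induction L with
  | nil => simp
  | cons x t ih =>
    obtain ⟨l, o, a⟩ := x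
    simp only [List.countP_cons, List.count_cons] at *
    cases l <;> cases o <;> cases a <;> simp <;> omega

def pv_set_update_of_subset (xs : List String) (s : PySem.Set String)
    (h : ∀ x ∈ xs, x ∈ s) : PySem.Set.update s xs = s := by
  induction xs generalizing s with
  | nil => rfl
  | cons x t ih =>
    have hx : PySem.Set.add s x = s := by
      have hm : x ∈ s := h x (List.mem_cons_self ..)
      simp [PySem.Set.add, PySem.Set.contains, hm]
    calc PySem.Set.update s (x :: t) = PySem.Set.update (PySem.Set.add s x) t := rfl
      _ = s := by rw [hx]; exact ih s (fun y hy => h y (List.mem_cons_of_mem _ hy))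

theorem compute_venn_counts_eq (rows : List (List (String × Bool))) :
    compute_venn_counts_from_observations rows = compute_venn_counts_from_observations_alt rows := by
  simp only [compute_venn_counts_from_observations, compute_venn_counts_from_observations_alt]
  set L := rows.map (fun r =>
    (pvRowGet r "Presente no Lattes", pvRowGet r "Presente no ORCID", pvRowGet r "Presente na OpenAlex")) with hL
  set counts0 : PySem.Dict String Int := PySem.Dict.mk
    [("Lattes_Apenas", 0), ("ORCID_Apenas", 0), ("OpenAlex_Apenas", 0),
     ("Lattes_ORCID_Apenas", 0), ("Lattes_OpenAlex_Apenas", 0),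
     ("ORCID_OpenAlex_Apenas", 0), ("Lattes_ORCID_OpenAlex", 0)] with hc0
  -- turn A's loop into a modify-loop over the mapped category strings
  have h1 : rows.foldl (fun d r =>
      match venn_category_for_row (pvRowGet r "Presente no Lattes")
          (pvRowGet r "Presente no ORCID") (pvRowGet r "Presente na OpenAlex") with
      | some c => d.modify c 0 (· + 1)
      | none => d) counts0
      = ((L.filter (fun x => !(x == (false, false, false)))).map pvCatStr).foldl
          (fun d c => d.modify c 0 (· + 1)) counts0 := by
    rw [List.foldl_map, ← PySem.List.foldl_if_eq_foldl_filter, hL, List.foldl_map]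
    apply PySem.List.foldl_congr_mem
    intro d r _
    exact pv_body_eq d _ _ _
  rw [h1]
  set cs := (L.filter (fun x => !(x == (false, false, false)))).map pvCatStr with hcs
  set final := cs.foldl (fun d c => d.modify c 0 (· + 1)) counts0 with hfin
  have hkeys : final.keys = counts0.keys := by
    rw [hfin, PySem.Dict.keys_foldl_modify]
    refine pv_set_update_of_subset cs counts0.keys ?_
    intro x hx
    rw [hcs] at hx
    obtain ⟨t, ht, rfl⟩ := List.mem_map.1 hx
    have h2 := (List.mem_filter.1 ht).2
    obtain ⟨l, o, a⟩ := t
    cases l <;> cases o <;> cases a <;> simp_all [pvCatStr, PySem.Dict.keys_mk]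
  have hnd : final.keys.Nodup := by rw [hkeys, hc0]; decide
  have hcnt : ∀ (n : String) (k : Bool × Bool × Bool),
      (∀ x : Bool × Bool × Bool, (pvCatStr x = n ∧ ¬ x = (false, false, false)) ↔ x = k) →
      counts0.getD n 0 = 0 →
      final.getD n 0 = (L.count k : Int) := by
    intro n k hk h0
    rw [hfin, PySem.Dict.getD_foldl_modify_add_one, h0, hcs, pv_count_key n k hk L]
    ring
  have hitems : final.items =
      [("Lattes_Apenas", (L.count (true, false, false) : Int)),
       ("ORCID_Apenas", (L.count (false, true, false) : Int)),
       ("OpenAlex_Apenas", (L.count (false, false, true) : Int)),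
       ("Lattes_ORCID_Apenas", (L.count (true, true, false) : Int)),
       ("Lattes_OpenAlex_Apenas", (L.count (true, false, true) : Int)),
       ("ORCID_OpenAlex_Apenas", (L.count (false, true, true) : Int)),
       ("Lattes_ORCID_OpenAlex", (L.count (true, true, true) : Int))] := by
    rw [PySem.Dict.items_eq_map_keys final hnd 0, hkeys]
    simp [hc0, PySem.Dict.keys_mk,
      hcnt "Lattes_Apenas" (true, false, false) (by decide) (by rw [hc0]; decide),
      hcnt "ORCID_Apenas" (false, true, false) (by decide) (by rw [hc0]; decide),
      hcnt "OpenAlex_Apenas" (false, false, true) (by decide) (by rw [hc0]; decide),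
      hcnt "Lattes_ORCID_Apenas" (true, true, false) (by decide) (by rw [hc0]; decide),
      hcnt "Lattes_OpenAlex_Apenas" (true, false, true) (by decide) (by rw [hc0]; decide),
      hcnt "ORCID_OpenAlex_Apenas" (false, true, true) (by decide) (by rw [hc0]; decide),
      hcnt "Lattes_ORCID_OpenAlex" (true, true, true) (by decide) (by rw [hc0]; decide)]
  obtain ⟨dL, dO, dA, dLO, dLA, dOA, dLOA⟩ := pv_decomp L
  have htot : final.values.foldl (· + ·) 0
      = (L.countP (fun x => x.1) : Int) + L.countP (fun x => x.2.1) + L.countP (fun x => x.2.2)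
        - L.countP (fun x => x.1 && x.2.1) - L.countP (fun x => x.1 && x.2.2)
        - L.countP (fun x => x.2.1 && x.2.2) + L.countP (fun x => x.1 && x.2.1 && x.2.2) := by
    simp only [PySem.Dict.values, hitems, List.map_cons, List.map_nil,
      List.foldl_cons, List.foldl_nil]
    omega
  refine Prod.ext ?_ ?_
  · simp only [hitems, List.cons.injEq, Prod.mk.injEq, and_true, true_and]
    refine ⟨?_, ?_, ?_, ?_, ?_, ?_, ?_⟩ <;> omega
  · simpa using htot

-- ===== VERDICT (by name: the statement is the Claim_ definition above) =====
theorem compute_venn_counts_from_observations_spec : Claim_equal_compute_venn_counts_from_observations := by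
  intro rows _
  exact compute_venn_counts_eq rows
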